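-- pv_equiv track=rewrite | github.com/etienneschalk/advent-of-code | advent_of_code/year_2023/year_2023_day_15.py | get_minimal_representation
-- ===== SOURCE A (Python) =====
-- ProblemDataType = list[str]
--
-- def get_minimal_representation(
--     parsed_input: ProblemDataType,
-- ) -> list[list[tuple[int, int]]]:
--     split = [line.split("#") for line in parsed_input]
--     cube_rock_indices = tuple(
--         tuple((*(idx for idx, c in enumerate(li) if c == "#"), len(li)))
--         for li in parsed_input
--     )
--     round_rock_counts = tuple(
--         tuple(sum(el == "O" for el in li) for li in line) for line in split
--     )
--     minimal_repr = [
--         list((goal, length) for goal, length in zip(idx, rock_count))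
--         for idx, rock_count in zip(cube_rock_indices, round_rock_counts)
--     ]
--
--     return minimal_repr
-- ===== SOURCE B (Python) =====
-- def get_minimal_representation(parsed_input):
--     out = []
--     for line in parsed_input:
--         reps = []
--         count = 0
--         for i, c in enumerate(line):
--             if c == "#":
--                 reps.append((i, count))
--                 count = 0
--             elif c == "O":
--                 count += 1
--         reps.append((len(line), count))
--         out.append(reps)
--     return out
-- ===== Notes on version B (the rewrite author's own statement) =====
-- stated objective: faster
-- what changed: Replaces three separate passes per line (split on '#', collect '#' indices via enumerate with a generator, count 'O's per segment) plus a final zip with a single left-to-right scan per line that keeps a running 'O' counter, emits (i, count) and resets at each '#', and flushes (len(line), count) at the end.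
import Mathlib
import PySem

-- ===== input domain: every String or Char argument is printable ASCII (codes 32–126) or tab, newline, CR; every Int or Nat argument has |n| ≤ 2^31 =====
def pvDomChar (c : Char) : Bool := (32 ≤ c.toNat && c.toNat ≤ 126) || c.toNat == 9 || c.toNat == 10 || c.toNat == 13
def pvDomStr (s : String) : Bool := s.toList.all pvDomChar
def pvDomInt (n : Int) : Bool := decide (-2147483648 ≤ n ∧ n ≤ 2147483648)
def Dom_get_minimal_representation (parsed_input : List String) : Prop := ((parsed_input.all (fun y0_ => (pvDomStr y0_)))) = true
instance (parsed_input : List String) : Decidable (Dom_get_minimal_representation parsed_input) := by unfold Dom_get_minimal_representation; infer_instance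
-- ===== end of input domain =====

-- ===== PORT A =====
-- A: three passes per line (split on '#', '#'-indices via enumerate, 'O' counts per segment) zipped together.
def get_minimal_representation (parsed_input : List String) : List (List (Int × Int)) :=
  let split := parsed_input.map (fun line => PySem.Chars.splitOn line.toList ['#'])
  let cube_rock_indices := parsed_input.map (fun li =>
    ((PySem.List.enumerate li.toList 0).filterMap (fun p => if p.2 == '#' then some p.1 else none))
      ++ [(li.toList.length : Int)])
  let round_rock_counts := split.map (fun line =>
    line.map (fun li => (li.map (fun el => if el == 'O' then (1 : Int) else 0)).sum))
  (cube_rock_indices.zip round_rock_counts).map (fun p => (p.1.zip p.2).map (fun q => (q.1, q.2)))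

-- ===== PORT B =====
-- B: one left-to-right scan per line with a running 'O' counter, emitted/reset at each '#', flushed at the end.
def pvScanLine : List Char → Int → Int → List (Int × Int)
  | [], i, count => [(i, count)]
  | c :: rest, i, count =>
      if c = '#' then (i, count) :: pvScanLine rest (i + 1) 0
      else if c = 'O' then pvScanLine rest (i + 1) (count + 1)
      else pvScanLine rest (i + 1) count

def get_minimal_representation_alt (parsed_input : List String) : List (List (Int × Int)) :=
  parsed_input.map (fun line => pvScanLine line.toList 0 0)

-- ===== PRECONDITION & SPEC =====
def Spec_get_minimal_representation (parsed_input : List String) (out : List (List (Int × Int))) : Prop := out = get_minimal_representation_alt parsed_input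
instance (parsed_input : List String) (out : List (List (Int × Int))) : Decidable (Spec_get_minimal_representation parsed_input out) := by unfold Spec_get_minimal_representation; infer_instance

-- ===== CLAIM (what is proved, stated in full; the proofs are below) =====
def Claim_equal_get_minimal_representation : Prop := ∀ (parsed_input : List String), Dom_get_minimal_representation parsed_input → Spec_get_minimal_representation parsed_input (get_minimal_representation parsed_input)

-- ===== LEMMAS AND PROOFS =====

-- Proof-only reformulation of single-char splitOn (segments accumulated in order).
def pvSplit (c0 : Char) (pre : List Char) : List Char → List (List Char)
  | [] => [pre]
  | c :: rest => if c = c0 then pre :: pvSplit c0 [] rest else pvSplit c0 (pre ++ [c]) rest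

lemma go_eq_pvSplit (c0 : Char) : ∀ (fuel : Nat) (l cur : List Char) (acc : List (List Char)),
    l.length < fuel →
    PySem.Chars.splitOn.go [c0] fuel l cur acc = acc.reverse ++ pvSplit c0 cur.reverse l := by
  intro fuel
  induction fuel with
  | zero => intro l cur acc h; omega
  | succ n ih =>
    intro l cur acc h
    cases l with
    | nil => simp [PySem.Chars.splitOn.go, pvSplit]
    | cons c rest =>
      rw [PySem.Chars.splitOn.go]
      by_cases hc : c = c0
      · simp only [hc, List.isPrefixOf, beq_self_eq_true, Bool.true_and, if_true,
          List.tail_cons, pvSplit, if_pos rfl, List.length_cons, List.length_nil,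
          List.drop_succ_cons, List.drop_zero]
        rw [ih rest [] (cur.reverse :: acc) (by simpa using h)]
        simp
      · have hEq : (c0 == c) = false := beq_false_of_ne (Ne.symm hc)
        simp only [List.isPrefixOf, hEq, Bool.false_and, if_false, pvSplit, if_neg hc]
        rw [ih rest (c :: cur) acc (by simpa using h)]
        simp

lemma splitOn_eq_pvSplit (c0 : Char) (l : List Char) :
    PySem.Chars.splitOn l [c0] = pvSplit c0 [] l := by
  rw [PySem.Chars.splitOn, go_eq_pvSplit c0 _ _ _ _ (by omega)]
  simp

-- 'O'-count of a segment, as A computes it.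
def pvCntO (seg : List Char) : Int := (seg.map (fun el => if el == 'O' then (1 : Int) else 0)).sum

lemma pvCntO_append (pre : List Char) (c : Char) :
    pvCntO (pre ++ [c]) = pvCntO pre + (if c = 'O' then 1 else 0) := by
  simp [pvCntO]

-- Loop invariant of B's scan: with the running count being the 'O'-count of the pending segment
-- prefix 'pre', the scan produces exactly A's zip of '#'-indices (plus length) with segment counts.
lemma pvScan_key : ∀ (cs : List Char) (i : Int) (pre : List Char),
    pvScanLine cs i (pvCntO pre) =
      (((PySem.List.enumerate cs i).filterMap (fun p => if p.2 == '#' then some p.1 else none))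
          ++ [i + cs.length]).zip ((pvSplit '#' pre cs).map pvCntO) := by
  intro cs
  induction cs with
  | nil => intro i pre; simp [pvScanLine, pvSplit, PySem.List.enumerate_nil]
  | cons c rest ih =>
    intro i pre
    rw [PySem.List.enumerate_cons]
    by_cases hc : c = '#'
    · subst hc
      simp only [pvScanLine, if_pos rfl, pvSplit, List.filterMap_cons, beq_self_eq_true, if_true,
        List.map_cons, List.cons_append, List.zip_cons_cons]
      rw [show (0 : Int) = pvCntO [] from rfl, ih (i+1) []]
      congr 2
      simp [List.length_cons]
      push_cast
      ring
    · have hb : (c == '#') = false := beq_false_of_ne hc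
      have hcount : ∀ j : Int, pvScanLine (c :: rest) j (pvCntO pre)
          = pvScanLine rest (j + 1) (pvCntO (pre ++ [c])) := by
        intro j
        rw [pvCntO_append]
        by_cases ho : c = 'O'
        · simp [pvScanLine, if_neg hc, if_pos ho, ho]
        · simp [pvScanLine, if_neg hc, if_neg ho, ho]
      rw [hcount, ih (i+1) (pre ++ [c])]
      simp only [pvSplit, if_neg hc, List.filterMap_cons, hb]
      congr 3
      simp [List.length_cons]
      push_cast
      ring

-- ===== VERDICT (by name: the statement is the Claim_ definition above) =====
theorem get_minimal_representation_spec : Claim_equal_get_minimal_representation := by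
  intro parsed_input _
  unfold Spec_get_minimal_representation get_minimal_representation get_minimal_representation_alt
  simp only [List.map_map, List.zip_map', List.map_map]
  apply List.map_congr_left
  intro line _
  simp only [Function.comp]
  rw [splitOn_eq_pvSplit]
  have key := pvScan_key line.toList 0 []
  rw [show pvCntO [] = 0 from rfl] at key
  have hfn : (fun li : List Char => (li.map (fun el => if el == 'O' then (1 : Int) else 0)).sum)
      = pvCntO := rfl
  rw [hfn, key]
  simp
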